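-- pv_equiv track=rewrite | github.com/Alintermans/Thesis | Experiments/ConstrainedParodieGenerator/SongUtils.py | process_parody
-- ===== SOURCE A (Python) =====
-- def divide_song_into_paragraphs(song):
--     paragraphs = []
--     current_paragraph = []
--     current_paragraph_name = ""
--     first_done = False
--     for line in song.split("\n"):
--         if line.startswith("["):
--             if first_done:
--                 paragraphs.append((current_paragraph_name, current_paragraph))
--                 current_paragraph = []
--             else:
--                 first_done = True
--             current_paragraph_name = line
--         elif line == '':
--                 continue
--         else:
--             current_paragraph.append(line)
--     paragraphs.append((current_paragraph_name, current_paragraph))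
--     result = []
--     for paragraph in paragraphs:
--         if not paragraph[0].startswith( "[ERROR]"):
--             result.append(paragraph)
--     return result
--
-- def process_parody(parody, song_structure):
--     parody_in_paragraphs = divide_song_into_paragraphs(parody)
--     new_parody = []
--     for index in song_structure:
--         new_parody.append( parody_in_paragraphs[index])
--
--     new_parody = [x+"\n"+"\n".join(y)+"\n" for x,y in new_parody]
--     new_parody = "\n".join(new_parody)
--
--     return new_parody
-- ===== SOURCE B (Python) =====
-- def _parse(name, body, rest):
--     # one paragraph starting at `name` with initial body lines `body`,
--     # followed by the paragraphs of the remaining lines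
--     i = 0
--     out_body = list(body)
--     while i < len(rest) and not rest[i].startswith("["):
--         out_body.append(rest[i])
--         i += 1
--     if i == len(rest):
--         return [(name, out_body)]
--     return [(name, out_body)] + _parse(rest[i], [], rest[i + 1:])
--
-- def process_parody(parody, song_structure):
--     lines = [l for l in parody.split("\n") if l != ""]
--     i = 0
--     while i < len(lines) and not lines[i].startswith("["):
--         i += 1
--     if i == len(lines):
--         paragraphs = [("", lines)]
--     else:
--         paragraphs = _parse(lines[i], lines[:i], lines[i + 1:])
--     paragraphs = [p for p in paragraphs if not p[0].startswith("[ERROR]")]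
--     return "\n".join(name + "\n" + "\n".join(body) + "\n"
--                      for name, body in (paragraphs[k] for k in song_structure))
-- ===== Notes on version B (the rewrite author's own statement) =====
-- stated objective: alternative
-- what changed: The paragraph parser is rewritten as a recursive split-at-the-next-header pass over the pre-filtered non-empty lines (prefix lines attach to the first header's paragraph) instead of A's single stateful line scan with a first_done flag and trailing append, and the output is built with a map/join instead of A's append-accumulator loop.
import Mathlib
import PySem

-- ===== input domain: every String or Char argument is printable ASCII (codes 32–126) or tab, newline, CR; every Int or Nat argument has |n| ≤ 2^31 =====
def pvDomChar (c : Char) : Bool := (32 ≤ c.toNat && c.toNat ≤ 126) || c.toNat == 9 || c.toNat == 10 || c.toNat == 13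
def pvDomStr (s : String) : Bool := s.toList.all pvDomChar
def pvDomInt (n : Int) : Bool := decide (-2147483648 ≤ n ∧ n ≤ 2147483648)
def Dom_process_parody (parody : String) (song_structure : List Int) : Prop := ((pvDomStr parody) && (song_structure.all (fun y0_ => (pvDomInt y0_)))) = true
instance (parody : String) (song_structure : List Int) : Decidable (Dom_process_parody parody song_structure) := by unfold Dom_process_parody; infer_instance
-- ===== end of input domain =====

-- B rewrites the paragraph parser as a recursive split-at-the-next-header pass over the
-- pre-filtered non-empty lines instead of A's single stateful scan with a first_done flag;
-- objective: alternative.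

-- ===== PORT A =====
-- loop body of A's for-line scan: state = (paragraphs, current_paragraph, current_paragraph_name, first_done)
def pvStepA (st : List (String × List String) × List String × String × Bool) (line : String) :
    List (String × List String) × List String × String × Bool :=
  if PySem.Str.startswith line "[" then
    if st.2.2.2 then (st.1 ++ [(st.2.2.1, st.2.1)], [], line, true)
    else (st.1, st.2.1, line, true)
  else if line = "" then st
  else (st.1, st.2.1 ++ [line], st.2.2.1, st.2.2.2)

def divide_song_into_paragraphs (song : String) : List (String × List String) :=
  let st := (((PySem.Str.split? song "\n").getD []).foldl pvStepA ([], [], "", false))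
  let paragraphs := st.1 ++ [(st.2.2.1, st.2.1)]
  paragraphs.foldl (fun r p => if !PySem.Str.startswith p.1 "[ERROR]" then r ++ [p] else r) []

def process_parody (parody : String) (song_structure : List Int) : String :=
  let parody_in_paragraphs := divide_song_into_paragraphs parody
  let new_parody := song_structure.foldl
    (fun acc i => acc ++ [(PySem.List.pyGet? parody_in_paragraphs i).getD ("", [])]) []
  let formatted := new_parody.map (fun p => p.1 ++ "\n" ++ PySem.Str.join "\n" p.2 ++ "\n")
  PySem.Str.join "\n" formatted

-- ===== PORT B =====
def pvIsHdr (l : String) : Bool := PySem.Str.startswith l "["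

-- B's _parse: one paragraph from `name`/`body` plus the leading non-header lines of `rest`,
-- then recurse at the next header
def pvParse (name : String) (body : List String) (rest : List String) :
    List (String × List String) :=
  if hsuf : rest.dropWhile (fun l => !pvIsHdr l) = [] then
    [(name, body ++ rest.takeWhile (fun l => !pvIsHdr l))]
  else
    (name, body ++ rest.takeWhile (fun l => !pvIsHdr l)) ::
      pvParse ((rest.dropWhile (fun l => !pvIsHdr l)).head hsuf) []
        (rest.dropWhile (fun l => !pvIsHdr l)).tail
termination_by rest.length
decreasing_by
  have h1 := List.length_dropWhile_le (fun l => !pvIsHdr l) rest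
  have h2 := List.length_pos_iff.mpr hsuf
  simp only [List.length_tail]
  omega

def process_parody_alt (parody : String) (song_structure : List Int) : String :=
  let lines := ((PySem.Str.split? parody "\n").getD []).filter (fun l => l ≠ "")
  let paragraphs :=
    if hsuf : lines.dropWhile (fun l => !pvIsHdr l) = [] then [("", lines)]
    else pvParse ((lines.dropWhile (fun l => !pvIsHdr l)).head hsuf)
          (lines.takeWhile (fun l => !pvIsHdr l)) (lines.dropWhile (fun l => !pvIsHdr l)).tail
  let kept := paragraphs.filter (fun p => !PySem.Str.startswith p.1 "[ERROR]")
  PySem.Str.join "\n" (song_structure.map (fun i =>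
    let p := (PySem.List.pyGet? kept i).getD ("", [])
    p.1 ++ "\n" ++ PySem.Str.join "\n" p.2 ++ "\n"))

-- ===== PRECONDITION & SPEC =====
-- Pre_ excludes exactly the inputs where Python A raises IndexError: every index in
-- song_structure must be a valid Python index into the list of kept paragraphs, whose count
-- is 1 for a headerless song and otherwise the number of non-"[ERROR]" header lines.
def Pre_process_parody (parody : String) (song_structure : List Int) : Prop :=
  let lines := ((PySem.Str.split? parody "\n").getD []).filter (fun l => l ≠ "")
  let hdrs := lines.filter (fun l => PySem.Str.startswith l "[")
  let n := if hdrs = [] then 1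
           else (hdrs.filter (fun l => !PySem.Str.startswith l "[ERROR]")).length
  ∀ i ∈ song_structure, PySem.Raise.InRange n i
instance (parody : String) (song_structure : List Int) : Decidable (Pre_process_parody parody song_structure) := by unfold Pre_process_parody; infer_instance

def pvWitness_process_parody : String × List Int := ("[A]\nx", [0, -1])

def Spec_process_parody (parody : String) (song_structure : List Int) (out : String) : Prop := out = process_parody_alt parody song_structure
instance (parody : String) (song_structure : List Int) (out : String) : Decidable (Spec_process_parody parody song_structure out) := by unfold Spec_process_parody; infer_instance

-- ===== CLAIM (what is proved, stated in full; the proofs are below) =====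
def Claim_equal_process_parody : Prop := ∀ (parody : String) (song_structure : List Int), Dom_process_parody parody song_structure → Pre_process_parody parody song_structure → Spec_process_parody parody song_structure (process_parody parody song_structure)

-- ===== LEMMAS AND PROOFS =====

theorem pvParse_nil (nm : String) (body : List String) : pvParse nm body [] = [(nm, body)] := by
  rw [pvParse]; simp

theorem pvParse_hdr (nm : String) (body : List String) (l : String) (ls : List String)
    (h : pvIsHdr l = true) :
    pvParse nm body (l :: ls) = (nm, body) :: pvParse l [] ls := by
  rw [pvParse]
  simp [h]

theorem pvParse_content (nm : String) (body : List String) (l : String) (ls : List String)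
    (h : pvIsHdr l = false) :
    pvParse nm body (l :: ls) = pvParse nm (body ++ [l]) ls := by
  rw [pvParse, pvParse]
  simp only [List.dropWhile_cons, List.takeWhile_cons, h, Bool.not_false, if_true]
  split <;> simp

theorem pvStartswith_ne_empty (l : String) (h : PySem.Str.startswith l "[" = true) : l ≠ "" := by
  intro he; subst he; simp [PySem.Str.startswith, PySem.Chars.startswith] at h

-- B's top-level branch on the position of the first header, as a proof-side function
def pvTop (cur : List String) (lf : List String) : List (String × List String) :=
  if hsuf : lf.dropWhile (fun l => !pvIsHdr l) = [] then [("", cur ++ lf)]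
  else pvParse ((lf.dropWhile (fun l => !pvIsHdr l)).head hsuf)
        (cur ++ lf.takeWhile (fun l => !pvIsHdr l)) (lf.dropWhile (fun l => !pvIsHdr l)).tail

theorem pvTop_nil (cur : List String) : pvTop cur [] = [("", cur)] := by
  simp [pvTop]

theorem pvTop_hdr (cur : List String) (l : String) (lf : List String) (hpv : pvIsHdr l = true) :
    pvTop cur (l :: lf) = pvParse l cur lf := by
  have h1 : List.dropWhile (fun x => !pvIsHdr x) (l :: lf) = l :: lf :=
    List.dropWhile_cons_of_neg (by simp [hpv])
  have h2 : List.takeWhile (fun x => !pvIsHdr x) (l :: lf) = [] :=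
    List.takeWhile_cons_of_neg (by simp [hpv])
  simp [pvTop, h1, h2]

theorem pvTop_content (cur : List String) (l : String) (lf : List String)
    (hpv : pvIsHdr l = false) :
    pvTop cur (l :: lf) = pvTop (cur ++ [l]) lf := by
  have h1 : List.dropWhile (fun x => !pvIsHdr x) (l :: lf) =
      List.dropWhile (fun x => !pvIsHdr x) lf :=
    List.dropWhile_cons_of_pos (by simp [hpv])
  have h2 : List.takeWhile (fun x => !pvIsHdr x) (l :: lf) =
      l :: List.takeWhile (fun x => !pvIsHdr x) lf :=
    List.takeWhile_cons_of_pos (by simp [hpv])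
  simp only [pvTop, h1, h2]
  split <;> simp

-- A's scan after the first header equals B's recursive parse on the non-empty remaining lines
theorem pvFold_true (ls : List String) (ps : List (String × List String))
    (cur : List String) (nm : String) :
    (ls.foldl pvStepA (ps, cur, nm, true)).1 ++
      [((ls.foldl pvStepA (ps, cur, nm, true)).2.2.1, (ls.foldl pvStepA (ps, cur, nm, true)).2.1)] =
    ps ++ pvParse nm cur (ls.filter (fun l => l ≠ "")) := by
  induction ls generalizing ps cur nm with
  | nil => simp [pvParse_nil]
  | cons l ls ih =>
    rw [List.foldl_cons]
    by_cases hh : PySem.Str.startswith l "[" = true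
    · have hc : PySem.Chars.startswith l.toList ['['] = true := by simpa using hh
      have hne : l ≠ "" := pvStartswith_ne_empty l hh
      have hst : pvStepA (ps, cur, nm, true) l = (ps ++ [(nm, cur)], [], l, true) := by
        simp [pvStepA, hc]
      rw [hst, ih (ps ++ [(nm, cur)]) [] l,
        List.filter_cons_of_pos (by simpa using hne),
        pvParse_hdr nm cur l _ (by simpa [pvIsHdr] using hh)]
      simp
    · have hc : PySem.Chars.startswith l.toList ['['] = false := by
        simpa using eq_false_of_ne_true hh
      by_cases he : l = ""
      · subst he
        have hst : pvStepA (ps, cur, nm, true) "" = (ps, cur, nm, true) := by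
          simp [pvStepA]; decide
        rw [hst, ih ps cur nm, List.filter_cons_of_neg (by simp)]
      · have hst : pvStepA (ps, cur, nm, true) l = (ps, cur ++ [l], nm, true) := by
          simp [pvStepA, hc, he]
        rw [hst, ih ps (cur ++ [l]) nm, List.filter_cons_of_pos (by simpa using he),
          pvParse_content nm cur l _ (by simpa [pvIsHdr] using eq_false_of_ne_true hh)]

-- A's whole scan (first_done = False) equals B's top-level split at the first header
theorem pvFold_false (ls : List String) (cur : List String) :
    (ls.foldl pvStepA ([], cur, "", false)).1 ++
      [((ls.foldl pvStepA ([], cur, "", false)).2.2.1, (ls.foldl pvStepA ([], cur, "", false)).2.1)] =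
    pvTop cur (ls.filter (fun l => l ≠ "")) := by
  induction ls generalizing cur with
  | nil => simp [pvTop_nil]
  | cons l ls ih =>
    rw [List.foldl_cons]
    by_cases hh : PySem.Str.startswith l "[" = true
    · have hc : PySem.Chars.startswith l.toList ['['] = true := by simpa using hh
      have hne : l ≠ "" := pvStartswith_ne_empty l hh
      have hpv : pvIsHdr l = true := by simpa [pvIsHdr] using hh
      have hst : pvStepA ([], cur, "", false) l = ([], cur, l, true) := by
        simp [pvStepA, hc]
      rw [hst, pvFold_true ls [] cur l, List.filter_cons_of_pos (by simpa using hne),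
        pvTop_hdr cur l _ hpv]
      simp
    · have hc : PySem.Chars.startswith l.toList ['['] = false := by
        simpa using eq_false_of_ne_true hh
      have hpv : pvIsHdr l = false := by simpa [pvIsHdr] using eq_false_of_ne_true hh
      by_cases he : l = ""
      · subst he
        have hst : pvStepA ([], cur, "", false) "" = ([], cur, "", false) := by
          simp [pvStepA]; decide
        rw [hst, ih cur, List.filter_cons_of_neg (by simp)]
      · have hst : pvStepA ([], cur, "", false) l = ([], cur ++ [l], "", false) := by
          simp [pvStepA, hc, he]
        rw [hst, ih (cur ++ [l]), List.filter_cons_of_pos (by simpa using he),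
          pvTop_content cur l _ hpv]

-- the two paragraph lists coincide
theorem pvDivide_eq (parody : String) :
    divide_song_into_paragraphs parody =
    (let lines := ((PySem.Str.split? parody "\n").getD []).filter (fun l => l ≠ "")
     let paragraphs :=
       if hsuf : lines.dropWhile (fun l => !pvIsHdr l) = [] then [("", lines)]
       else pvParse ((lines.dropWhile (fun l => !pvIsHdr l)).head hsuf)
             (lines.takeWhile (fun l => !pvIsHdr l)) (lines.dropWhile (fun l => !pvIsHdr l)).tail
     paragraphs.filter (fun p => !PySem.Str.startswith p.1 "[ERROR]")) := by
  unfold divide_song_into_paragraphs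
  rw [PySem.List.foldl_append_if_eq_filter]
  rw [pvFold_false ((PySem.Str.split? parody "\n").getD []) []]
  rfl

-- ===== VERDICT (by name: the statement is the Claim_ definition above) =====
theorem process_parody_spec : Claim_equal_process_parody := by
  intro parody ss _ _
  unfold Spec_process_parody process_parody process_parody_alt
  rw [pvDivide_eq]
  simp only [PySem.List.foldl_append_singleton_eq_map, List.map_map, List.nil_append]
  rfl
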